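-- pv_equiv track=rewrite | github.com/MuratBudun/Bazlama.PersistedObject | examples/basic/backend/src/hooks.py | _estimate_reading_time
-- ===== SOURCE A (Python) =====
-- def _estimate_reading_time(content_blocks: list) -> int:
--     """Estimate reading time from content blocks (avg 200 words/min)."""
--     word_count = 0
--     for block in content_blocks:
--         if isinstance(block, dict):
--             text = block.get("content", "")
--             if isinstance(text, str):
--                 word_count += len(text.split())
--     return max(1, word_count // 200)
-- ===== SOURCE B (Python) =====
-- def _estimate_reading_time(content_blocks: list) -> int:
--     """Estimate reading time from content blocks (avg 200 words/min)."""
--     texts = []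
--     for block in content_blocks:
--         if isinstance(block, dict):
--             text = block.get("content", "")
--             if isinstance(text, str):
--                 texts.append(text)
--     words = " ".join(texts).split()
--     return max(1, len(words) // 200)
-- ===== Notes on version B (the rewrite author's own statement) =====
-- stated objective: alternative
-- what changed: Instead of summing per-block split() word counts in the loop, B gathers the valid content strings, joins them with a single space and splits the joined text once; equivalence rests on split()'s whitespace collapsing.
import Mathlib
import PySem

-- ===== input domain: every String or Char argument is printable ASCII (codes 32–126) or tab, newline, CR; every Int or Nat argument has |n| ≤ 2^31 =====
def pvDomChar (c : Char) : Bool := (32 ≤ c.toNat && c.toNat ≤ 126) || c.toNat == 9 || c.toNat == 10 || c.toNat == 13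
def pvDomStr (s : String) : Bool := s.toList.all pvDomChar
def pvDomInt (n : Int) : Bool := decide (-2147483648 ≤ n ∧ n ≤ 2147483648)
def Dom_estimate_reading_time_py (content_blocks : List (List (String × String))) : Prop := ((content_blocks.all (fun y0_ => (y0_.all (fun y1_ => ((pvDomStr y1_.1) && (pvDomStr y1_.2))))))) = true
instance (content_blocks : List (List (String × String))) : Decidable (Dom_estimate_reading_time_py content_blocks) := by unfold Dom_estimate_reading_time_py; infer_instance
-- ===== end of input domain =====

-- B gathers the valid content strings, joins them with one space and splits once, instead of
-- summing per-block split() counts in the loop; return value only, neither version mutates its input.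

-- ===== PORT A =====
-- every block is a dict of str→str under the type convention, so the isinstance guards always pass
def estimate_reading_time_py (content_blocks : List (List (String × String))) : Int :=
  let word_count : Int := content_blocks.foldl
    (fun wc block =>
      wc + ((PySem.Str.split₀ (PySem.Dict.getD ⟨block⟩ "content" "")).length : Int)) 0
  max 1 (PySem.Int.floordiv word_count 200)

-- ===== PORT B =====
def estimate_reading_time_py_alt (content_blocks : List (List (String × String))) : Int :=
  let texts : List String := content_blocks.foldl
    (fun acc block => acc ++ [PySem.Dict.getD ⟨block⟩ "content" ""]) []
  let words := PySem.Str.split₀ (PySem.Str.join " " texts)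
  max 1 (PySem.Int.floordiv (words.length : Int) 200)

-- ===== PRECONDITION & SPEC =====
def Spec_estimate_reading_time_py (content_blocks : List (List (String × String))) (out : Int) : Prop := out = estimate_reading_time_py_alt content_blocks
instance (content_blocks : List (List (String × String))) (out : Int) : Decidable (Spec_estimate_reading_time_py content_blocks out) := by unfold Spec_estimate_reading_time_py; infer_instance

-- ===== CLAIM (what is proved, stated in full; the proofs are below) =====
def Claim_equal_estimate_reading_time_py : Prop := ∀ (content_blocks : List (List (String × String))), Dom_estimate_reading_time_py content_blocks → Spec_estimate_reading_time_py content_blocks (estimate_reading_time_py content_blocks)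

-- ===== LEMMAS AND PROOFS =====

-- the accumulator of split₀.go only contributes its own length
theorem split0_go_acc (s cur acc) :
    (PySem.Chars.split₀.go s cur acc).length = acc.length + (PySem.Chars.split₀.go s cur []).length := by
  induction s generalizing cur acc with
  | nil => by_cases h : cur.isEmpty <;> simp [PySem.Chars.split₀.go, h]
  | cons c rest ih =>
    by_cases hs : PySem.Chars.isspace c
    · by_cases hc : cur.isEmpty
      · simp only [PySem.Chars.split₀.go, hs, hc, if_true]
        exact ih [] acc
      · rw [Bool.not_eq_true] at hc
        simp only [PySem.Chars.split₀.go, hs, hc, if_true, Bool.false_eq_true, if_false]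
        rw [ih [] (cur.reverse :: acc), ih [] [cur.reverse]]
        simp; omega
    · rw [Bool.not_eq_true] at hs
      simp only [PySem.Chars.split₀.go, hs, Bool.false_eq_true, if_false]
      exact ih (c :: cur) acc

-- a space in the middle splits the word count additively
theorem split0_go_space (xs ys : List Char) (cur acc) :
    (PySem.Chars.split₀.go (xs ++ ' ' :: ys) cur acc).length =
      (PySem.Chars.split₀.go xs cur acc).length + (PySem.Chars.split₀.go ys [] []).length := by
  induction xs generalizing cur acc with
  | nil =>
    by_cases hc : cur.isEmpty
    · simp only [List.nil_append, PySem.Chars.split₀.go, hc, if_true,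
        show PySem.Chars.isspace ' ' = true from rfl]
      rw [split0_go_acc ys [] acc]
      simp
    · rw [Bool.not_eq_true] at hc
      simp only [List.nil_append, PySem.Chars.split₀.go, hc, Bool.false_eq_true, if_false,
        show PySem.Chars.isspace ' ' = true from rfl, if_true]
      rw [split0_go_acc ys [] (cur.reverse :: acc)]
      simp
  | cons c rest ih =>
    by_cases hs : PySem.Chars.isspace c
    · by_cases hc : cur.isEmpty
      · simp only [List.cons_append, PySem.Chars.split₀.go, hs, hc, if_true]
        exact ih [] acc
      · rw [Bool.not_eq_true] at hc
        simp only [List.cons_append, PySem.Chars.split₀.go, hs, hc, if_true, Bool.false_eq_true, if_false]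
        exact ih [] (cur.reverse :: acc)
    · rw [Bool.not_eq_true] at hs
      simp only [List.cons_append, PySem.Chars.split₀.go, hs, Bool.false_eq_true, if_false]
      exact ih (c :: cur) acc

-- word count of a space-joined list is the sum of the word counts
theorem wc_intercalate (ts : List (List Char)) :
    (PySem.Chars.split₀ (List.intercalate [' '] ts)).length =
      (ts.map (fun t => (PySem.Chars.split₀ t).length)).sum := by
  induction ts with
  | nil => simp [List.intercalate, PySem.Chars.split₀, PySem.Chars.split₀.go]
  | cons t ts ih =>
    cases ts with
    | nil => simp [List.intercalate, List.intersperse]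
    | cons u us =>
      have hstep : List.intercalate [' '] (t :: u :: us) = t ++ ' ' :: List.intercalate [' '] (u :: us) := by
        simp [List.intercalate, List.intersperse]
      rw [hstep]
      show (PySem.Chars.split₀.go (t ++ ' ' :: List.intercalate [' '] (u :: us)) [] []).length = _
      rw [split0_go_space]
      simp only [List.map_cons, List.sum_cons] at ih ⊢
      rw [← ih]
      rfl

-- A's per-block Int sum equals B's single count of the joined text
theorem counts_eq (cbs : List (List (String × String))) :
    (cbs.map (fun b => ((PySem.Str.split₀ (PySem.Dict.getD ⟨b⟩ "content" "")).length : Int))).sum =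
      ((PySem.Str.split₀ (PySem.Str.join " "
        (cbs.map (fun b => PySem.Dict.getD ⟨b⟩ "content" "")))).length : Int) := by
  simp only [PySem.Str.split₀, PySem.Str.join, List.length_map, String.toList_ofList,
    PySem.Chars.join, List.map_map]
  rw [show " ".toList = [' '] from rfl, wc_intercalate, List.map_map]
  push_cast [Nat.cast_list_sum]
  rw [List.map_map]
  rfl

-- ===== VERDICT (by name: the statement is the Claim_ definition above) =====
theorem estimate_reading_time_py_spec : Claim_equal_estimate_reading_time_py := by
  intro cbs _
  unfold Spec_estimate_reading_time_py estimate_reading_time_py estimate_reading_time_py_alt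
  rw [PySem.List.foldl_add, PySem.List.foldl_append_singleton_eq_map]
  simp only [List.nil_append, zero_add]
  rw [counts_eq]
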